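-- pv_equiv track=rewrite | github.com/JoNoToPo/COMP-1510-Term-Project-Rewrite | map.py | display_text_next_to_map
-- ===== SOURCE A (Python) =====
-- def display_text_next_to_map(map_key: dict, input_text: str, rows_down=0):
--     """
--     Breaks up input text for each '/' and places it at the end of each row of the map.
--
--     :param map_key: a dictionary of non-zero length containing two integer coordinates in a tuple for each key and
--     an integer or string as the value
--     :param input_text: a string
--     :param rows_down: an integer
--     :precondition: a dictionary a string and an integer
--     :postcondition: a dictionary
--     :return: the map key dictionary modified to have the input text broken up by every '/' at the end of each row
--
--     >>> display_text_next_to_map({}, "this/is/a/test")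
--     {(0, 31): '  this', (1, 31): '  is', (2, 31): '  a', (3, 31): '  test'}
--     >>> display_text_next_to_map({}, "basecase")
--     {(0, 31): '  basecase'}
--     """
--     line = "  "
--     for letter in input_text:
--         if letter != "/":
--             line += letter
--         else:
--             map_key[(rows_down, 31)] = line
--             rows_down += 1
--             line = "  "
--     map_key[(rows_down, 31)] = line
--     return map_key
-- ===== SOURCE B (Python) =====
-- def display_text_next_to_map(map_key: dict, input_text: str, rows_down=0):
--     for i, part in enumerate(input_text.split('/')):
--         map_key[(rows_down + i, 31)] = "  " + part
--     return map_key
-- ===== Notes on version B (the rewrite author's own statement) =====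
-- stated objective: simpler
-- what changed: Replaced the character-by-character accumulator/flush state machine by str.split('/') followed by one uniform enumerate-indexed dict assignment per fragment.
import Mathlib
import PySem

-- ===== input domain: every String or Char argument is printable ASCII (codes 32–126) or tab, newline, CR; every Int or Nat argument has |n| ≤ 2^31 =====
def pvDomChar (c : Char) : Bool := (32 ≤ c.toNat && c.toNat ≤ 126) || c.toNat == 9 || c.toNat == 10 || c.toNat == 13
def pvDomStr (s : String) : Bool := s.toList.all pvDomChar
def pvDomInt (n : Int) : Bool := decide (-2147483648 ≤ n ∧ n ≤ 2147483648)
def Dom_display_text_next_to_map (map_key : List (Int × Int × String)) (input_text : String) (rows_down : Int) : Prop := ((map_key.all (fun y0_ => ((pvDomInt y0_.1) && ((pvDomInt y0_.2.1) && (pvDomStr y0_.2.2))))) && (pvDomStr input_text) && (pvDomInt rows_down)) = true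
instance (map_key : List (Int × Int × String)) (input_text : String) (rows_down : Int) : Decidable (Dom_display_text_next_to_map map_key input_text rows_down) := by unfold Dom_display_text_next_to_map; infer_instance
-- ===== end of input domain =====

-- ===== PORT A =====
-- B simplifies A's character-by-character accumulator/flush state machine into split('/') + one
-- indexed assignment pass (objective: simpler). Return value only; both Pythons mutate map_key alike.

-- shared dict-representation helper: Python `d[(a, b)] = v` on the flattened association list
-- (overwrite in place keeps the position; a new key is appended) — exact dict-assignment semantics
def pvDictSet (d : List (Int × Int × String)) (a b : Int) (v : String) : List (Int × Int × String) :=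
  match d with
  | [] => [(a, b, v)]
  | (x, y, w) :: rest =>
      if x = a ∧ y = b then (x, y, v) :: rest else (x, y, w) :: pvDictSet rest a b v

-- A's loop body; `line` is carried as List Char (Python str concatenation `line += letter` is
-- `++ [letter]` on the code points — exact; String.ofList materialises the stored value)
def pvStepA (st : List (Int × Int × String) × Int × List Char) (letter : Char) :
    List (Int × Int × String) × Int × List Char :=
  if letter ≠ '/' then (st.1, st.2.1, st.2.2 ++ [letter])
  else (pvDictSet st.1 st.2.1 31 (String.ofList st.2.2), st.2.1 + 1, [' ', ' '])

def display_text_next_to_map (map_key : List (Int × Int × String)) (input_text : String) (rows_down : Int) : List (Int × Int × String) :=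
  let st := input_text.toList.foldl pvStepA (map_key, rows_down, [' ', ' '])
  pvDictSet st.1 st.2.1 31 (String.ofList st.2.2)

-- ===== PORT B =====
-- Source B: for i, part in enumerate(input_text.split('/')): map_key[(rows_down + i, 31)] = "  " + part
-- (split('/') is PySem.Chars.splitOn on the code points; '"  " + part' is ofList (' '::' '::part) — exact)
def display_text_next_to_map_alt (map_key : List (Int × Int × String)) (input_text : String) (rows_down : Int) : List (Int × Int × String) :=
  (PySem.List.enumerate (PySem.Chars.splitOn input_text.toList ['/']) 0).foldl
    (fun acc p => pvDictSet acc (rows_down + p.1) 31 (String.ofList (' ' :: ' ' :: p.2))) map_key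

-- ===== PRECONDITION & SPEC =====
def Spec_display_text_next_to_map (map_key : List (Int × Int × String)) (input_text : String) (rows_down : Int) (out : List (Int × Int × String)) : Prop := out = display_text_next_to_map_alt map_key input_text rows_down
instance (map_key : List (Int × Int × String)) (input_text : String) (rows_down : Int) (out : List (Int × Int × String)) : Decidable (Spec_display_text_next_to_map map_key input_text rows_down out) := by unfold Spec_display_text_next_to_map; infer_instance

-- ===== CLAIM (what is proved, stated in full; the proofs are below) =====
def Claim_equal_display_text_next_to_map : Prop := ∀ (map_key : List (Int × Int × String)) (input_text : String) (rows_down : Int), Dom_display_text_next_to_map map_key input_text rows_down → Spec_display_text_next_to_map map_key input_text rows_down (display_text_next_to_map map_key input_text rows_down)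

-- ===== LEMMAS AND PROOFS =====

-- structural recursion equivalent of Python's split('/')
def pvSplit : List Char → List (List Char)
  | [] => [[]]
  | c :: t =>
      if c = '/' then [] :: pvSplit t
      else match pvSplit t with
           | [] => [[c]]
           | p :: ps => (c :: p) :: ps

theorem pvSplit_ne_nil (cs : List Char) : pvSplit cs ≠ [] := by
  cases cs with
  | nil => simp [pvSplit]
  | cons c t =>
      simp only [pvSplit]
      split
      · simp
      · split <;> simp

-- prepend `pre` to the head part
def pvPreH (pre : List Char) : List (List Char) → List (List Char)
  | [] => [pre]
  | p :: ps => (pre ++ p) :: ps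

theorem splitOn_go_eq (fuel : Nat) : ∀ (l cur : List Char) (acc : List (List Char)),
    l.length < fuel →
    PySem.Chars.splitOn.go ['/'] fuel l cur acc
      = acc.reverse ++ pvPreH cur.reverse (pvSplit l) := by
  induction fuel with
  | zero => intro l cur acc h; omega
  | succ f ih =>
      intro l cur acc h
      cases l with
      | nil =>
          rw [PySem.Chars.splitOn.go]
          · simp [pvSplit, pvPreH]
          · omega
      | cons c rest =>
          rw [PySem.Chars.splitOn.go]
          by_cases hc : c = '/'
          · subst hc
            have hpre : List.isPrefixOf ['/'] ('/' :: rest) = true := by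
              simp [List.isPrefixOf]
            rw [if_pos hpre]
            have hd : List.drop ['/'].length ('/' :: rest) = rest := by simp
            rw [hd, ih rest [] (List.reverse cur :: acc) (by simp at h ⊢; omega)]
            rcases hps : pvSplit rest with _ | ⟨p, ps⟩
            · exact absurd hps (pvSplit_ne_nil rest)
            · simp [pvSplit, hps, pvPreH]
          · have hpre : List.isPrefixOf ['/'] (c :: rest) = false := by
              simp [List.isPrefixOf]
              intro h'; exact absurd h'.symm hc
            rw [if_neg (by simp [hpre])]
            rw [ih rest (c :: cur) acc (by simp at h ⊢; omega)]
            rcases hps : pvSplit rest with _ | ⟨p, ps⟩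
            · exact absurd hps (pvSplit_ne_nil rest)
            · simp [pvSplit, hps, pvPreH, hc]

theorem splitOn_eq_pvSplit (cs : List Char) :
    PySem.Chars.splitOn cs ['/'] = pvSplit cs := by
  unfold PySem.Chars.splitOn
  rw [splitOn_go_eq (cs.length + 1) cs [] [] (by omega)]
  rcases hps : pvSplit cs with _ | ⟨p, ps⟩
  · exact absurd hps (pvSplit_ne_nil cs)
  · simp [pvPreH]

-- the writer loop both sides reduce to
def pvWrite (m : List (Int × Int × String)) (r : Int) (parts : List (Int × List Char)) :
    List (Int × Int × String) :=
  parts.foldl (fun acc p => pvDictSet acc (r + p.1) 31 (String.ofList p.2)) m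

-- head part gets `line`, every later part gets the fresh "  "
def pvPrefixed (line : List Char) : List (List Char) → List (List Char)
  | [] => [line]
  | p :: ps => (line ++ p) :: ps.map (fun q => ' ' :: ' ' :: q)

theorem pvWrite_shift (L : List (List Char)) : ∀ (m : List (Int × Int × String)) (r s : Int),
    pvWrite m r (PySem.List.enumerate L (s + 1)) = pvWrite m (r + 1) (PySem.List.enumerate L s) := by
  induction L with
  | nil => intro m r s; simp [PySem.List.enumerate_nil, pvWrite]
  | cons p ps ih =>
      intro m r s
      rw [PySem.List.enumerate_cons, PySem.List.enumerate_cons]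
      simp only [pvWrite, List.foldl_cons]
      have h1 : r + (s + 1) = r + 1 + s := by ring
      rw [h1]
      exact ih _ r (s + 1)

theorem loopA_eq (cs : List Char) : ∀ (m : List (Int × Int × String)) (r : Int) (line : List Char),
    pvDictSet (cs.foldl pvStepA (m, r, line)).1 (cs.foldl pvStepA (m, r, line)).2.1 31
        (String.ofList (cs.foldl pvStepA (m, r, line)).2.2)
      = pvWrite m r (PySem.List.enumerate (pvPrefixed line (pvSplit cs)) 0) := by
  induction cs with
  | nil =>
      intro m r line
      simp [pvSplit, pvPrefixed, PySem.List.enumerate_cons, PySem.List.enumerate_nil, pvWrite]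
  | cons c t ih =>
      intro m r line
      by_cases hc : c = '/'
      · subst hc
        simp only [List.foldl_cons]
        have step : pvStepA (m, r, line) '/' = (pvDictSet m r 31 (String.ofList line), r + 1, [' ', ' ']) := by
          simp [pvStepA]
        rw [step]
        rw [ih (pvDictSet m r 31 (String.ofList line)) (r + 1) [' ', ' ']]
        -- right-hand side
        rcases hps : pvSplit t with _ | ⟨p, ps⟩
        · exact absurd hps (pvSplit_ne_nil t)
        · have hsp : pvSplit ('/' :: t) = [] :: p :: ps := by simp [pvSplit, hps]
          have hpref : pvPrefixed line ([] :: p :: ps)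
              = line :: (' ' :: ' ' :: p) :: ps.map (fun q => ' ' :: ' ' :: q) := by
            simp [pvPrefixed]
          have hpref2 : pvPrefixed [' ', ' '] (p :: ps)
              = (' ' :: ' ' :: p) :: ps.map (fun q => ' ' :: ' ' :: q) := by
            simp [pvPrefixed]
          rw [hsp, hpref, hpref2,
            ← pvWrite_shift ((' ' :: ' ' :: p) :: ps.map (fun q => ' ' :: ' ' :: q))
              (pvDictSet m r 31 (String.ofList line)) r 0]
          simp [pvWrite, PySem.List.enumerate_cons]
      · simp only [List.foldl_cons]
        have step : pvStepA (m, r, line) c = (m, r, line ++ [c]) := by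
          simp [pvStepA, hc]
        rw [step, ih m r (line ++ [c])]
        rcases hps : pvSplit t with _ | ⟨p, ps⟩
        · exact absurd hps (pvSplit_ne_nil t)
        · simp [pvSplit, hc, hps, pvPrefixed, List.append_assoc]

theorem alt_eq_pvWrite (ps : List (List Char)) : ∀ (m : List (Int × Int × String)) (r s : Int),
    (PySem.List.enumerate ps s).foldl
        (fun acc p => pvDictSet acc (r + p.1) 31 (String.ofList (' ' :: ' ' :: p.2))) m
      = pvWrite m r (PySem.List.enumerate (ps.map (fun q => ' ' :: ' ' :: q)) s) := by
  induction ps with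
  | nil => intro m r s; simp [PySem.List.enumerate_nil, pvWrite]
  | cons p t ih =>
      intro m r s
      simp only [List.map, PySem.List.enumerate_cons, List.foldl_cons, pvWrite]
      exact ih _ r (s + 1)

-- ===== VERDICT (by name: the statement is the Claim_ definition above) =====
theorem display_text_next_to_map_spec : Claim_equal_display_text_next_to_map := by
  intro map_key input_text rows_down _
  unfold Spec_display_text_next_to_map
  unfold display_text_next_to_map display_text_next_to_map_alt
  rw [splitOn_eq_pvSplit, loopA_eq input_text.toList map_key rows_down [' ', ' '],
    alt_eq_pvWrite (pvSplit input_text.toList) map_key rows_down 0]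
  rcases hps : pvSplit input_text.toList with _ | ⟨p, ps⟩
  · exact absurd hps (pvSplit_ne_nil input_text.toList)
  · simp [pvPrefixed, List.map]
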